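-- pv_equiv track=rewrite | github.com/bkille/RESP | Project/group2.py | row_probability
-- ===== SOURCE A (Python) =====
-- def student_consecutive_k(input_list, k, stone):
--     # Your code goes here
--     counter = 0
--     consecutive = False
--     for i in input_list:
--       if i == stone:
--         counter += 1
--       if i != stone:
--         counter = 0
--       if counter == k:
--         consecutive = True
--         break
--     return consecutive
--
-- def row_probability(board, stone):
--   probability = 0
--   # Determines row probabilities for given stone
--   for row in board:
--     # Determines consecutives row probabilities for given stone
--     if student_consecutive_k(row, 1, stone):
--       probability = 1
--     if student_consecutive_k(row, 2, stone):
--       probability = 2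
--     if student_consecutive_k(row, 3, stone):
--       probability = 3
--     if student_consecutive_k(row, 4, stone):
--       probability = 4
--     if student_consecutive_k(row, 5, stone):
--       probability = 5
--   return probability
-- ===== SOURCE B (Python) =====
-- def row_probability(board, stone):
--     probability = 0
--     for row in board:
--         run = 0
--         best = 0
--         for i in row:
--             run = run + 1 if i == stone else 0
--             if run > best:
--                 best = run
--         if best >= 1:
--             probability = min(best, 5)
--     return probability
-- ===== Notes on version B (the rewrite author's own statement) =====
-- stated objective: simpler
-- what changed: Dropped the student_consecutive_k helper and its five threshold rescans per row; one pass per row tracks the running run length and its maximum, then sets probability = min(best,5) when the row has a stone.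
import Mathlib
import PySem

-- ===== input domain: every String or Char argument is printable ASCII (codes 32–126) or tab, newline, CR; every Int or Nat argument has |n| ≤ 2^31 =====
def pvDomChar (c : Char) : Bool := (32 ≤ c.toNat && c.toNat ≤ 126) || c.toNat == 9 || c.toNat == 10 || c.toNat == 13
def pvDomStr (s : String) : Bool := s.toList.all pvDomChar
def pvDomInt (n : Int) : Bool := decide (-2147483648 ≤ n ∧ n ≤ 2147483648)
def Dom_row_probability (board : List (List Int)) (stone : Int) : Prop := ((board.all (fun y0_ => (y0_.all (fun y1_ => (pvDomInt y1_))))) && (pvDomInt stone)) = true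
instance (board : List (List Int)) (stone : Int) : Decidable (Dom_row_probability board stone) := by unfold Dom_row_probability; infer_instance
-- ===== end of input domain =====

-- B replaces A's five threshold rescans per row (via student_consecutive_k) with one
-- pass per row tracking the running run length and its maximum; objective: simpler.

-- ===== PORT A =====
-- student_consecutive_k's loop: state is (counter, consecutive); `break` on counter == k
-- is modelled by returning true immediately.
def sckLoop (input_list : List Int) (k : Int) (stone : Int) (counter : Int) : Bool :=
  match input_list with
  | [] => false
  | i :: rest =>
    let counter := if i == stone then counter + 1 else counter
    let counter := if i != stone then 0 else counter
    if counter == k then true else sckLoop rest k stone counter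

def student_consecutive_k (input_list : List Int) (k : Int) (stone : Int) : Bool :=
  sckLoop input_list k stone 0

def row_probability (board : List (List Int)) (stone : Int) : Int :=
  board.foldl (fun probability row =>
    let probability := if student_consecutive_k row 1 stone then 1 else probability
    let probability := if student_consecutive_k row 2 stone then 2 else probability
    let probability := if student_consecutive_k row 3 stone then 3 else probability
    let probability := if student_consecutive_k row 4 stone then 4 else probability
    let probability := if student_consecutive_k row 5 stone then 5 else probability
    probability) 0

-- ===== PORT B =====
-- inner loop of Source B: state (run, best)
def runBest (row : List Int) (stone : Int) (rb : Int × Int) : Int × Int :=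
  match row with
  | [] => rb
  | i :: rest =>
    let run := if i == stone then rb.1 + 1 else 0
    let best := if run > rb.2 then run else rb.2
    runBest rest stone (run, best)

def row_probability_alt (board : List (List Int)) (stone : Int) : Int :=
  board.foldl (fun probability row =>
    let rb := runBest row stone (0, 0)
    if rb.2 ≥ 1 then min rb.2 5 else probability) 0

-- ===== PRECONDITION & SPEC =====
def Spec_row_probability (board : List (List Int)) (stone : Int) (out : Int) : Prop := out = row_probability_alt board stone
instance (board : List (List Int)) (stone : Int) (out : Int) : Decidable (Spec_row_probability board stone out) := by unfold Spec_row_probability; infer_instance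

-- ===== CLAIM (what is proved, stated in full; the proofs are below) =====
def Claim_equal_row_probability : Prop := ∀ (board : List (List Int)) (stone : Int), Dom_row_probability board stone → Spec_row_probability board stone (row_probability board stone)

-- ===== LEMMAS AND PROOFS =====

-- max run length of `stone` in the list, given a current run of `c` entering the list
def bestAux (l : List Int) (stone : Int) (c : Int) : Int :=
  match l with
  | [] => 0
  | i :: rest =>
    let r := if i == stone then c + 1 else 0
    max r (bestAux rest stone r)

-- A's helper characterised: with 1 ≤ k and counter c < k it reports true iff some run reaches k
theorem sckLoop_iff (l : List Int) (k stone c : Int) (hk1 : 1 ≤ k) (hc : c < k) :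
    sckLoop l k stone c = true ↔ k ≤ bestAux l stone c := by
  induction l generalizing c with
  | nil =>
    simp only [sckLoop, bestAux, Bool.false_eq_true, false_iff]
    omega
  | cons i rest ih =>
    simp only [sckLoop, bestAux]
    by_cases hi : i = stone
    · simp only [hi, beq_self_eq_true, if_true, bne_self_eq_false, Bool.false_eq_true, if_false]
      by_cases hke : c + 1 = k
      · simp only [hke, beq_self_eq_true, if_true, true_iff]
        have := le_max_left k (bestAux rest stone k)
        omega
      · rw [if_neg (by simp [hke]), ih (c + 1) (by omega)]
        simp only [le_max_iff]
        omega
    · have hbe : (i == stone) = false := by simp [hi]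
      simp only [hbe, Bool.false_eq_true, if_false, bne, Bool.not_false, if_true]
      rw [if_neg (by simp; omega), ih 0 (by omega)]
      simp only [le_max_iff]
      omega

-- B's inner loop computes max of the carried best and the max run, given nonnegative state
theorem runBest_snd (l : List Int) (stone : Int) (c b : Int) (hc : 0 ≤ c) (hb : 0 ≤ b) :
    (runBest l stone (c, b)).2 = max b (bestAux l stone c) := by
  induction l generalizing c b with
  | nil => simp only [runBest, bestAux]; omega
  | cons i rest ih =>
    simp only [runBest, bestAux]
    by_cases hi : i = stone
    · simp only [hi, beq_self_eq_true, if_true]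
      rw [ih (c + 1) _ (by omega) (by split <;> omega)]
      split <;> omega
    · have hbe : (i == stone) = false := by simp [hi]
      simp only [hbe, Bool.false_eq_true, if_false]
      rw [ih 0 _ le_rfl (by split <;> omega)]
      split <;> omega

theorem bestAux_nonneg (row : List Int) (stone c : Int) (hc : 0 ≤ c) :
    0 ≤ bestAux row stone c := by
  cases row with
  | nil => simp [bestAux]
  | cons i rest =>
    simp only [bestAux]
    exact le_max_iff.mpr (Or.inl (by split <;> omega))

-- the per-row step functions agree
theorem step_eq (row : List Int) (stone p : Int) :
    (if student_consecutive_k row 5 stone then 5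
     else if student_consecutive_k row 4 stone then 4
     else if student_consecutive_k row 3 stone then 3
     else if student_consecutive_k row 2 stone then 2
     else if student_consecutive_k row 1 stone then 1 else p) =
    (if (runBest row stone (0, 0)).2 ≥ 1 then min (runBest row stone (0, 0)).2 5 else p) := by
  have h0 : 0 ≤ bestAux row stone 0 := bestAux_nonneg row stone 0 le_rfl
  have hb2 : (runBest row stone (0, 0)).2 = bestAux row stone 0 := by
    rw [runBest_snd row stone 0 0 le_rfl le_rfl]; omega
  have h1 := sckLoop_iff row 1 stone 0 (by omega) (by omega)
  have h2 := sckLoop_iff row 2 stone 0 (by omega) (by omega)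
  have h3 := sckLoop_iff row 3 stone 0 (by omega) (by omega)
  have h4 := sckLoop_iff row 4 stone 0 (by omega) (by omega)
  have h5 := sckLoop_iff row 5 stone 0 (by omega) (by omega)
  simp only [student_consecutive_k]
  set B := bestAux row stone 0 with hB
  rw [hb2]
  by_cases c5 : 5 ≤ B
  · rw [if_pos (h5.mpr c5), if_pos (by omega)]; omega
  · rw [if_neg (by rw [h5]; omega)]
    by_cases c4 : 4 ≤ B
    · rw [if_pos (h4.mpr c4), if_pos (by omega)]; omega
    · rw [if_neg (by rw [h4]; omega)]
      by_cases c3 : 3 ≤ B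
      · rw [if_pos (h3.mpr c3), if_pos (by omega)]; omega
      · rw [if_neg (by rw [h3]; omega)]
        by_cases c2 : 2 ≤ B
        · rw [if_pos (h2.mpr c2), if_pos (by omega)]; omega
        · rw [if_neg (by rw [h2]; omega)]
          by_cases c1 : 1 ≤ B
          · rw [if_pos (h1.mpr c1), if_pos (by omega)]; omega
          · rw [if_neg (by rw [h1]; omega), if_neg (by omega)]

theorem fold_eq (board : List (List Int)) (stone : Int) (p : Int) :
    board.foldl (fun probability row =>
      let probability := if student_consecutive_k row 1 stone then 1 else probability
      let probability := if student_consecutive_k row 2 stone then 2 else probability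
      let probability := if student_consecutive_k row 3 stone then 3 else probability
      let probability := if student_consecutive_k row 4 stone then 4 else probability
      let probability := if student_consecutive_k row 5 stone then 5 else probability
      probability) p =
    board.foldl (fun probability row =>
      let rb := runBest row stone (0, 0)
      if rb.2 >= 1 then min rb.2 5 else probability) p := by
  induction board generalizing p with
  | nil => rfl
  | cons row rest ih =>
    simp only [List.foldl_cons]
    rw [step_eq row stone p]
    exact ih _

-- ===== VERDICT (by name: the statement is the Claim_ definition above) =====
theorem row_probability_spec : Claim_equal_row_probability := by
  intro board stone _
  unfold Spec_row_probability row_probability row_probability_alt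
  exact fold_eq board stone 0
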